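-- pv_equiv track=rewrite | github.com/shriram7057/LeetCode-POTD-Master- | LeetCode-POTD-Solutions/Q3.-Sum-of-Scores-of-Built-Strings.py | sumScores
-- ===== SOURCE A (Python) =====
-- def sumScores(s):
--     n = len(s)
--     Z = [0] * n
--
--     # Z-algorithm
--     l = r = 0
--     for i in range(1, n):
--         if i <= r:
--             Z[i] = min(r - i + 1, Z[i - l])
--         while i + Z[i] < n and s[Z[i]] == s[i + Z[i]]:
--             Z[i] += 1
--         if i + Z[i] - 1 > r:
--             l = i
--             r = i + Z[i] - 1
--
--     # Sum of scores = sum(Z) + n (full match at index 0)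
--     return sum(Z) + n
-- ===== SOURCE B (Python) =====
-- def sumScores(s):
--     n = len(s)
--     total = n
--     for i in range(1, n):
--         j = 0
--         while j < n - i and s[j] == s[i + j]:
--             j += 1
--         total += j
--     return total
-- ===== Notes on version B (the rewrite author's own statement) =====
-- stated objective: simpler
-- what changed: Replaced the Z-algorithm (Z array with maintained [l,r] match window and seeded extensions) by an independent naive prefix-match scan for each suffix, accumulating the counts directly.
import Mathlib
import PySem

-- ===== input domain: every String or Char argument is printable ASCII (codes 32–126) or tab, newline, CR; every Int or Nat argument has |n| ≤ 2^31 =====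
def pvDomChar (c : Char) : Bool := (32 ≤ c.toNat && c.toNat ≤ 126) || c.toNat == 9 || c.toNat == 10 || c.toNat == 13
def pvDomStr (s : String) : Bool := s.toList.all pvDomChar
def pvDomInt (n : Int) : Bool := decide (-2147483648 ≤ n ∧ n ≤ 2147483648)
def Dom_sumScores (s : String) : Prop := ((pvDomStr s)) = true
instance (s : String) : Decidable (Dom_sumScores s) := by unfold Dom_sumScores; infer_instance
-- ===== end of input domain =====

-- B replaces A's Z-algorithm (Z array + maintained [l,r] window) by an independent
-- naive prefix-match scan per suffix; objective: simpler (not faster).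

-- ===== PORT A =====
-- the inner `while i + Z[i] < n and s[Z[i]] == s[i + Z[i]]: Z[i] += 1` loop
def pvZwhile (xs : List Char) (i z : Nat) : Nat :=
  if h : i + z < xs.length ∧ xs[z]? = xs[i + z]? then pvZwhile xs i (z + 1) else z
termination_by xs.length - (i + z)
decreasing_by omega

-- one iteration of A's `for i in range(1, n)` loop; state = (Z, l, r)
def pvStepA (xs : List Char) (st : List Nat × Nat × Nat) (i : Nat) : List Nat × Nat × Nat :=
  let Z := st.1
  let l := st.2.1
  let r := st.2.2
  let z0 := if i ≤ r then min (r - i + 1) (Z.getD (i - l) 0) else 0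
  let z := pvZwhile xs i z0
  let Z' := Z.set i z
  if r < i + z - 1 then (Z', i, i + z - 1) else (Z', l, r)

def sumScores (s : String) : Int :=
  let xs := s.toList
  let n := xs.length
  let st := (List.range' 1 (n - 1)).foldl (pvStepA xs) (List.replicate n 0, 0, 0)
  (st.1.sum : Int) + n

-- ===== PORT B =====
-- B's inner while `j < n - i and s[j] == s[i + j]` ported as structural recursion that
-- walks the prefix and the suffix together (exact: `j < n - i` ↔ the suffix list is
-- nonempty; the prefix list, being longer, never empties first)
def pvMatchLen : List Char → List Char → Nat
  | a :: as, b :: bs => if a = b then pvMatchLen as bs + 1 else 0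
  | _, _ => 0

def sumScores_alt (s : String) : Int :=
  let xs := s.toList
  let n := xs.length
  (n : Int) + ((List.range' 1 (n - 1)).map (fun i => (pvMatchLen xs (xs.drop i) : Int))).sum

-- ===== PRECONDITION & SPEC =====
def Spec_sumScores (s : String) (out : Int) : Prop := out = sumScores_alt s
instance (s : String) (out : Int) : Decidable (Spec_sumScores s out) := by unfold Spec_sumScores; infer_instance

-- ===== CLAIM (what is proved, stated in full; the proofs are below) =====
def Claim_equal_sumScores : Prop := ∀ (s : String), Dom_sumScores s → Spec_sumScores s (sumScores s)

-- ===== LEMMAS AND PROOFS =====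

-- invariant of A's loop at the start of iteration i: the window [l,r] matches the prefix,
-- filled Z entries equal the naive match lengths, and the running sum agrees
def pvInv (xs : List Char) (i : Nat) (st : List Nat × Nat × Nat) : Prop :=
  st.1.length = xs.length ∧
  st.2.1 < i ∧
  (st.2.1 = 0 → st.2.2 = 0) ∧
  st.2.2 < xs.length ∧
  (∀ t, 1 ≤ st.2.1 → st.2.1 + t ≤ st.2.2 → xs[st.2.1 + t]? = xs[t]?) ∧
  (∀ j, 1 ≤ j → j < i → st.1.getD j 0 = pvMatchLen xs (xs.drop j)) ∧
  (∀ j, i ≤ j → st.1.getD j 0 = 0) ∧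
  st.1.sum = ((List.range' 1 (i - 1)).map (fun j => pvMatchLen xs (xs.drop j))).sum

theorem pvMatchLen_le (a : List Char) : ∀ b : List Char, pvMatchLen a b ≤ b.length := by
  induction a with
  | nil => intro b; cases b <;> simp [pvMatchLen]
  | cons x xs ih =>
    intro b
    cases b with
    | nil => simp [pvMatchLen]
    | cons y ys =>
      simp only [pvMatchLen, List.length_cons]
      split
      · have := ih ys; omega
      · omega

theorem pvMatchLen_get (a : List Char) : ∀ (b : List Char) (j : Nat),
    j < pvMatchLen a b → a[j]? = b[j]? := by
  induction a with
  | nil => intro b j h; exfalso; cases b <;> simp [pvMatchLen] at h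
  | cons x xs ih =>
    intro b j h
    cases b with
    | nil => simp [pvMatchLen] at h
    | cons y ys =>
      simp only [pvMatchLen] at h
      split at h
      next heq =>
        cases j with
        | zero => simp [heq]
        | succ j' => simpa using ih ys j' (by omega)
      next => omega

theorem pvMatchLen_stop (a : List Char) : ∀ b : List Char,
    pvMatchLen a b < b.length → a[pvMatchLen a b]? ≠ b[pvMatchLen a b]? := by
  induction a with
  | nil =>
    intro b h
    cases b with
    | nil => simp [pvMatchLen] at h
    | cons y ys => simp [pvMatchLen]
  | cons x xs ih =>
    intro b h
    cases b with
    | nil => simp [pvMatchLen] at h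
    | cons y ys =>
      simp only [pvMatchLen] at h ⊢
      split
      next heq =>
        rw [if_pos heq] at h
        simpa using ih ys (by simpa using h)
      next hne => simpa using hne

theorem le_pvMatchLen (a : List Char) : ∀ (b : List Char) (k : Nat),
    (∀ j < k, j < b.length ∧ a[j]? = b[j]?) → k ≤ pvMatchLen a b := by
  induction a with
  | nil =>
    intro b k h
    cases k with
    | zero => omega
    | succ k' =>
      exfalso
      obtain ⟨hb, heq⟩ := h 0 (by omega)
      rw [List.getElem?_eq_getElem hb] at heq
      simp at heq
  | cons x xs ih =>
    intro b k h
    cases b with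
    | nil =>
      cases k with
      | zero => omega
      | succ k' =>
        exfalso
        obtain ⟨hb, -⟩ := h 0 (by omega)
        simp at hb
    | cons y ys =>
      cases k with
      | zero => omega
      | succ k' =>
        obtain ⟨-, h0⟩ := h 0 (by omega)
        simp at h0
        simp only [pvMatchLen, if_pos h0]
        have hk : k' ≤ pvMatchLen xs ys := by
          apply ih
          intro j hj
          have := h (j + 1) (by omega)
          simpa using this
        omega

theorem pvZwhile_eq (xs : List Char) (i : Nat) :
    ∀ (d z0 : Nat), pvMatchLen xs (xs.drop i) - z0 = d → z0 ≤ pvMatchLen xs (xs.drop i) →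
    pvZwhile xs i z0 = pvMatchLen xs (xs.drop i) := by
  intro d
  induction d with
  | zero =>
    intro z0 hd hle
    have hz : z0 = pvMatchLen xs (xs.drop i) := by omega
    rw [pvZwhile, dif_neg, hz]
    rintro ⟨h1, h2⟩
    have hL : pvMatchLen xs (xs.drop i) < (xs.drop i).length := by
      simp only [List.length_drop]; omega
    have hstop := pvMatchLen_stop xs (xs.drop i) hL
    rw [List.getElem?_drop] at hstop
    rw [hz] at h2
    exact hstop h2
  | succ d' ih =>
    intro z0 hd hle
    have hlt : z0 < pvMatchLen xs (xs.drop i) := by omega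
    have hlen : pvMatchLen xs (xs.drop i) ≤ (xs.drop i).length := pvMatchLen_le xs (xs.drop i)
    rw [List.length_drop] at hlen
    have h1 : i + z0 < xs.length := by omega
    have h2 : xs[z0]? = xs[i + z0]? := by
      have := pvMatchLen_get xs (xs.drop i) z0 hlt
      rwa [List.getElem?_drop] at this
    rw [pvZwhile, dif_pos ⟨h1, h2⟩]
    exact ih (z0 + 1) (by omega) (by omega)

theorem pvSum_set_of_getD_zero : ∀ (l : List Nat) (i v : Nat), i < l.length → l.getD i 0 = 0 →
    (l.set i v).sum = l.sum + v := by
  intro l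
  induction l with
  | nil => intro i v h; simp at h
  | cons x xs ih =>
    intro i v h h0
    cases i with
    | zero => simp_all; omega
    | succ i' =>
      simp only [List.set_cons_succ, List.sum_cons]
      rw [ih i' v (by simpa using h) (by simpa using h0)]
      omega

theorem pvGetD_set_self (l : List Nat) (i v : Nat) (h : i < l.length) :
    (l.set i v).getD i 0 = v := by
  rw [List.getD_eq_getElem?_getD, List.getElem?_set_self h]
  rfl

theorem pvGetD_set_ne (l : List Nat) (i j v : Nat) (h : i ≠ j) :
    (l.set i v).getD j 0 = l.getD j 0 := by
  rw [List.getD_eq_getElem?_getD, List.getElem?_set_ne h, ← List.getD_eq_getElem?_getD]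

theorem pvStep_inv (xs : List Char) (i : Nat) (st : List Nat × Nat × Nat)
    (h1 : 1 ≤ i) (h2 : i < xs.length) (hI : pvInv xs i st) :
    pvInv xs (i + 1) (pvStepA xs st i) := by
  obtain ⟨Z, l, r⟩ := st
  obtain ⟨hsize, hli, hl0, hrn, hwin, hZ1, hZ2, hsum⟩ := hI
  simp only at hsize hli hl0 hrn hwin hZ1 hZ2 hsum
  -- the seeded start value is a valid lower bound for the true extension length
  have hseed : (if i ≤ r then min (r - i + 1) (Z.getD (i - l) 0) else 0)
      ≤ pvMatchLen xs (xs.drop i) := by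
    split
    next hir =>
      have hl1 : 1 ≤ l := by
        by_contra hc
        have hr0 := hl0 (by omega)
        omega
      have hZil : Z.getD (i - l) 0 = pvMatchLen xs (xs.drop (i - l)) :=
        hZ1 (i - l) (by omega) (by omega)
      rw [hZil]
      apply le_pvMatchLen
      intro j hj
      have hjr : i + j ≤ r := by omega
      have hjL : j < pvMatchLen xs (xs.drop (i - l)) := by omega
      refine ⟨by simp only [List.length_drop]; omega, ?_⟩
      rw [List.getElem?_drop]
      have hA : xs[j]? = xs[(i - l) + j]? := by
        have := pvMatchLen_get xs (xs.drop (i - l)) j hjL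
        rwa [List.getElem?_drop] at this
      have hB : xs[l + ((i - l) + j)]? = xs[(i - l) + j]? :=
        hwin ((i - l) + j) hl1 (by omega)
      have harith : l + ((i - l) + j) = i + j := by omega
      rw [harith] at hB
      rw [hA, hB]
    next => omega
  have hz : pvZwhile xs i (if i ≤ r then min (r - i + 1) (Z.getD (i - l) 0) else 0)
      = pvMatchLen xs (xs.drop i) :=
    pvZwhile_eq xs i _ _ rfl hseed
  have hLle : pvMatchLen xs (xs.drop i) ≤ xs.length - i := by
    have := pvMatchLen_le xs (xs.drop i)
    rwa [List.length_drop] at this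
  simp only [pvStepA, hz]
  -- facts about the updated Z
  have hlen' : (Z.set i (pvMatchLen xs (xs.drop i))).length = xs.length := by
    rw [List.length_set, hsize]
  have hZ1' : ∀ j, 1 ≤ j → j < i + 1 →
      (Z.set i (pvMatchLen xs (xs.drop i))).getD j 0 = pvMatchLen xs (xs.drop j) := by
    intro j hj hj'
    rcases Nat.lt_or_ge j i with hlt | hge
    · rw [pvGetD_set_ne Z i j _ (by omega)]
      exact hZ1 j hj hlt
    · have hji : j = i := by omega
      rw [hji, pvGetD_set_self Z i _ (by omega)]
  have hZ2' : ∀ j, i + 1 ≤ j →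
      (Z.set i (pvMatchLen xs (xs.drop i))).getD j 0 = 0 := by
    intro j hj
    rw [pvGetD_set_ne Z i j _ (by omega)]
    exact hZ2 j (by omega)
  have hsum' : (Z.set i (pvMatchLen xs (xs.drop i))).sum
      = ((List.range' 1 ((i + 1) - 1)).map (fun j => pvMatchLen xs (xs.drop j))).sum := by
    rw [pvSum_set_of_getD_zero Z i _ (by omega) (hZ2 i (by omega)), hsum]
    have hrange : List.range' 1 ((i + 1) - 1) = List.range' 1 (i - 1) ++ [i] := by
      have h : (i + 1) - 1 = (i - 1) + 1 := by omega
      rw [h, List.range'_1_concat]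
      have h2 : 1 + (i - 1) = i := by omega
      rw [h2]
    rw [hrange, List.map_append, List.sum_append]
    simp
  split
  next hbr =>
    simp only [pvInv]
    refine ⟨hlen', by omega, by omega, ?_, ?_, hZ1', hZ2', hsum'⟩
    · omega
    · intro t ht1 ht2
      have htL : t < pvMatchLen xs (xs.drop i) := by omega
      have := pvMatchLen_get xs (xs.drop i) t htL
      rw [List.getElem?_drop] at this
      exact this.symm
  next hbr =>
    simp only [pvInv]
    exact ⟨hlen', by omega, hl0, hrn, hwin, hZ1', hZ2', hsum'⟩

theorem pvFold_inv (xs : List Char) : ∀ (len lo : Nat) (st : List Nat × Nat × Nat),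
    1 ≤ lo → lo + len ≤ xs.length → pvInv xs lo st →
    pvInv xs (lo + len) ((List.range' lo len).foldl (pvStepA xs) st) := by
  intro len
  induction len with
  | zero => intro lo st _ _ h; simpa using h
  | succ d ih =>
    intro lo st hlo hle hinv
    rw [List.range'_succ, List.foldl_cons]
    have := ih (lo + 1) (pvStepA xs st lo) (by omega) (by omega)
      (pvStep_inv xs lo st hlo (by omega) hinv)
    have harith : lo + 1 + d = lo + (d + 1) := by omega
    rwa [harith] at this

theorem pvMain (xs : List Char) :
    (((List.range' 1 (xs.length - 1)).foldl (pvStepA xs)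
        (List.replicate xs.length 0, 0, 0)).1.sum : Int) + xs.length
      = (xs.length : Int)
        + ((List.range' 1 (xs.length - 1)).map (fun i => (pvMatchLen xs (xs.drop i) : Int))).sum := by
  rcases Nat.eq_zero_or_pos xs.length with hn | hn
  · simp [hn]
  · have hinit : pvInv xs 1 (List.replicate xs.length 0, 0, 0) := by
      refine ⟨by simp, Nat.zero_lt_one, fun _ => rfl, hn, ?_, ?_, ?_, by simp⟩
      · intro t ht _
        exact absurd ht (by simp)
      · intro j hj hj'
        omega
      · intro j _
        simp [List.getD_eq_getElem?_getD]
    have hfold := pvFold_inv xs (xs.length - 1) 1 (List.replicate xs.length 0, 0, 0)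
      (by omega) (by omega) hinit
    have harith : 1 + (xs.length - 1) = xs.length := by omega
    rw [harith] at hfold
    obtain ⟨-, -, -, -, -, -, -, hsum⟩ := hfold
    rw [hsum, Nat.cast_list_sum, List.map_map]
    have hfun : (Nat.cast ∘ fun j => pvMatchLen xs (xs.drop j))
        = fun i => (pvMatchLen xs (xs.drop i) : Int) := rfl
    rw [hfun]
    ring

-- ===== VERDICT (by name: the statement is the Claim_ definition above) =====
theorem sumScores_spec : Claim_equal_sumScores := by
  intro s _
  show sumScores s = sumScores_alt s
  show (((List.range' 1 (s.toList.length - 1)).foldl (pvStepA s.toList)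
      (List.replicate s.toList.length 0, 0, 0)).1.sum : Int) + s.toList.length
    = (s.toList.length : Int)
      + ((List.range' 1 (s.toList.length - 1)).map
          (fun i => (pvMatchLen s.toList (s.toList.drop i) : Int))).sum
  exact pvMain s.toList
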